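-- pv_equiv track=rewrite | github.com/Park-Giryun/Algorithm-Programmers | 코딩테스트 고득점 Kit/해시/베스트앨범.py | solution
-- ===== SOURCE A (Python) =====
-- from collections import defaultdict
--
-- def solution(genres, plays):
--     answer = []
--     cnt = defaultdict(int)
--     song = defaultdict(list)
--
--     for id, (g, p) in enumerate(zip(genres, plays)):
--         cnt[g] += p
--         song[g].append((-p, id))
--
--     genres = sorted(cnt.keys(), key=lambda x: cnt[x], reverse=True)
--
--     for g in genres:
--         answer.extend([id for p, id in sorted(song[g])[:2]])
--
--     return answer
-- ===== SOURCE B (Python) =====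
-- def solution(genres, plays):
--     total = {}
--     first = {}
--     songs = list(enumerate(zip(genres, plays)))
--     for i, (g, p) in songs:
--         if g not in total:
--             total[g] = 0
--             first[g] = i
--         total[g] += p
--     songs.sort(key=lambda s: (-total[s[1][0]], first[s[1][0]], -s[1][1], s[0]))
--     answer = []
--     taken = {}
--     for i, (g, p) in songs:
--         c = taken.get(g, 0)
--         if c < 2:
--             answer.append(i)
--             taken[g] = c + 1
--     return answer
-- ===== Notes on version B (the rewrite author's own statement) =====
-- stated objective: alternative
-- what changed: Instead of per-genre song lists each sorted separately after a separate sort of the genres, B does one global sort of all songs by the composite key (-genre_total, genre_first_appearance_index, -play, id) followed by a single linear pass that emits at most two ids per genre.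
import Mathlib
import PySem

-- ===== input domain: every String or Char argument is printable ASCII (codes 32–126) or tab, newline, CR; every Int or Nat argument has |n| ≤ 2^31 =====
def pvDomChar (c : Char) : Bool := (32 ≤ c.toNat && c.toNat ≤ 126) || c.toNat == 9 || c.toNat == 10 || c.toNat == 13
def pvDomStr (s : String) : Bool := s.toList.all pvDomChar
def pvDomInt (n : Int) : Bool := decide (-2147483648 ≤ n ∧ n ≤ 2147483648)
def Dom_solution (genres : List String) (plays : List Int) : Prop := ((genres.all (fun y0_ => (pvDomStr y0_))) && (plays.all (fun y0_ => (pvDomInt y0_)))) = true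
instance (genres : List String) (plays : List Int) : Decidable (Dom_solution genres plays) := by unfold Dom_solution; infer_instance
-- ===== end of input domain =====

-- B replaces A's per-genre sorts plus a separate genre sort by ONE global sort of all songs
-- under the composite key (-genre_total, genre_first_appearance, -play, id) followed by a
-- single linear pass emitting at most two ids per genre (objective: alternative algorithm).

-- ===== PORT A =====
-- literal transliteration of A: two defaultdicts built in one enumerate(zip(...)) loop,
-- genres sorted by total plays descending (stable), then per genre sorted(song[g])[:2].
def solution (genres : List String) (plays : List Int) : List Int :=
  let st := (PySem.List.enumerate (genres.zip plays)).foldl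
      (fun st x =>
        (st.1.modify x.2.1 0 (· + x.2.2),
         st.2.modify x.2.1 [] (· ++ [(-x.2.2, x.1)])))
      ((PySem.Dict.empty : PySem.Dict String Int),
       (PySem.Dict.empty : PySem.Dict String (List (Int × Int))))
  let cnt := st.1
  let song := st.2
  let gs := PySem.List.sorted cnt.keys (fun x => cnt.getD x 0) true
  gs.foldl (fun answer g =>
    answer ++ ((PySem.List.sorted (song.getD g []) (fun q => toLex q)).take 2).map (fun q => q.2)) []

-- ===== PORT B =====
-- literal transliteration of B (Source B): one pass builds total plays and first-appearance index
-- per genre, one global sort by the composite key, one pass emits ≤ 2 ids per genre.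
def solution_alt (genres : List String) (plays : List Int) : List Int :=
  let songs := PySem.List.enumerate (genres.zip plays)
  let tf := songs.foldl
      (fun st x =>
        let st' := if st.1.contains x.2.1 then st else (st.1.insert x.2.1 0, st.2.insert x.2.1 x.1)
        (st'.1.insert x.2.1 (st'.1.getD x.2.1 0 + x.2.2), st'.2))
      ((PySem.Dict.empty : PySem.Dict String Int), (PySem.Dict.empty : PySem.Dict String Int))
  let total := tf.1
  let first := tf.2
  let ss := PySem.List.sorted songs
      (fun s => toLex (-(total.getD s.2.1 0), toLex (first.getD s.2.1 0, toLex (-(s.2.2), s.1))))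
  (ss.foldl (fun st s =>
      let c := st.2.getD s.2.1 0
      if c < 2 then (st.1 ++ [s.1], st.2.insert s.2.1 (c + 1)) else st)
    (([] : List Int), (PySem.Dict.empty : PySem.Dict String Int))).1

-- ===== PRECONDITION & SPEC =====
def Spec_solution (genres : List String) (plays : List Int) (out : List Int) : Prop := out = solution_alt genres plays
instance (genres : List String) (plays : List Int) (out : List Int) : Decidable (Spec_solution genres plays out) := by unfold Spec_solution; infer_instance

-- ===== CLAIM (what is proved, stated in full; the proofs are below) =====
def Claim_equal_solution : Prop := ∀ (genres : List String) (plays : List Int), Dom_solution genres plays → Spec_solution genres plays (solution genres plays)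

-- ===== LEMMAS AND PROOFS =====

-- proof-side names for the pieces of the two ports (each is definitionally the port's code)
def pvL (genres : List String) (plays : List Int) : List (Int × String × Int) :=
  PySem.List.enumerate (genres.zip plays)

def pvCnt (genres : List String) (plays : List Int) : PySem.Dict String Int :=
  (pvL genres plays).foldl (fun d x => d.modify x.2.1 0 (· + x.2.2)) PySem.Dict.empty

def pvSong (genres : List String) (plays : List Int) : PySem.Dict String (List (Int × Int)) :=
  (pvL genres plays).foldl (fun d x => d.modify x.2.1 [] (· ++ [(-x.2.2, x.1)])) PySem.Dict.empty

def pvStepB (st : PySem.Dict String Int × PySem.Dict String Int) (x : Int × String × Int) :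
    PySem.Dict String Int × PySem.Dict String Int :=
  let st' := if st.1.contains x.2.1 then st else (st.1.insert x.2.1 0, st.2.insert x.2.1 x.1)
  (st'.1.insert x.2.1 (st'.1.getD x.2.1 0 + x.2.2), st'.2)

def pvTF (genres : List String) (plays : List Int) : PySem.Dict String Int × PySem.Dict String Int :=
  (pvL genres plays).foldl pvStepB (PySem.Dict.empty, PySem.Dict.empty)

def pvKeyB (total first : PySem.Dict String Int) (s : Int × String × Int) :
    Lex (Int × Lex (Int × Lex (Int × Int))) :=
  toLex (-(total.getD s.2.1 0), toLex (first.getD s.2.1 0, toLex (-(s.2.2), s.1)))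

def pvStepP (st : List Int × PySem.Dict String Int) (s : Int × String × Int) :
    List Int × PySem.Dict String Int :=
  let c := st.2.getD s.2.1 0
  if c < 2 then (st.1 ++ [s.1], st.2.insert s.2.1 (c + 1)) else st

def pvBlock (genres : List String) (plays : List Int) (g : String) : List (Int × String × Int) :=
  (pvL genres plays).filter (fun x => x.2.1 == g)

def pvSB (genres : List String) (plays : List Int) (g : String) : List (Int × String × Int) :=
  PySem.List.sorted (pvBlock genres plays g) (pvKeyB (pvTF genres plays).1 (pvTF genres plays).2) false



theorem pv_enum_cons {α : Type} (x : α) (xs : List α) (k : Int) :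
    PySem.List.enumerate (x :: xs) k = (k, x) :: PySem.List.enumerate xs (k + 1) := rfl

theorem pv_enum_ge {α : Type} (xs : List α) (k : Int) : ∀ x ∈ PySem.List.enumerate xs k, k ≤ x.1 := by
  induction xs generalizing k with
  | nil => intro x hx; simp [PySem.List.enumerate] at hx
  | cons a t ih =>
    intro x hx
    rw [pv_enum_cons, List.mem_cons] at hx
    rcases hx with hx | hx
    · simp [hx]
    · have := ih (k + 1) x hx; omega

theorem pv_enum_pairwise {α : Type} (xs : List α) (k : Int) :
    (PySem.List.enumerate xs k).Pairwise (fun a b => a.1 < b.1) := by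
  induction xs generalizing k with
  | nil => simp [PySem.List.enumerate]
  | cons a t ih =>
    rw [pv_enum_cons]
    exact List.Pairwise.cons (fun y hy => by have := pv_enum_ge t (k+1) y hy; omega) (ih (k+1))

theorem pv_cnt_getD (ls : List (Int × String × Int)) (d : PySem.Dict String Int) (g : String) :
    (ls.foldl (fun d x => d.modify x.2.1 0 (· + x.2.2)) d).getD g 0
      = d.getD g 0 + ((ls.filter (fun x => x.2.1 == g)).map (fun x => x.2.2)).sum := by
  induction ls generalizing d with
  | nil => simp
  | cons x t ih =>
    simp only [List.foldl_cons, List.filter_cons]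
    rw [ih]
    by_cases hx : x.2.1 = g
    · simp [hx]
      ring
    · have : (x.2.1 == g) = false := by simp [hx]
      simp [this, PySem.Dict.getD_modify, Ne.symm hx]

theorem pv_song_getD (ls : List (Int × String × Int)) (d : PySem.Dict String (List (Int × Int))) (g : String) :
    (ls.foldl (fun d x => d.modify x.2.1 [] (· ++ [(-x.2.2, x.1)])) d).getD g []
      = d.getD g [] ++ (ls.filter (fun x => x.2.1 == g)).map (fun x => (-x.2.2, x.1)) := by
  induction ls generalizing d with
  | nil => simp
  | cons x t ih =>
    simp only [List.foldl_cons, List.filter_cons]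
    rw [ih]
    by_cases hx : x.2.1 = g
    · simp [hx]
    · have : (x.2.1 == g) = false := by simp [hx]
      simp [this, PySem.Dict.getD_modify, Ne.symm hx]

theorem pv_tot_getD (ls : List (Int × String × Int)) (d : PySem.Dict String Int) (g : String) :
    (ls.foldl (fun d x => d.insert x.2.1 (d.getD x.2.1 0 + x.2.2)) d).getD g 0
      = d.getD g 0 + ((ls.filter (fun x => x.2.1 == g)).map (fun x => x.2.2)).sum := by
  induction ls generalizing d with
  | nil => simp
  | cons x t ih =>
    simp only [List.foldl_cons, List.filter_cons]
    rw [ih]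
    by_cases hx : x.2.1 = g
    · simp [hx]
      ring
    · have : (x.2.1 == g) = false := by simp [hx]
      simp [this, PySem.Dict.getD_insert, Ne.symm hx]

theorem pvStepB_fst (d e : PySem.Dict String Int) (x : Int × String × Int) :
    (pvStepB (d, e) x).1 = d.insert x.2.1 (d.getD x.2.1 0 + x.2.2) := by
  unfold pvStepB
  by_cases h : d.contains x.2.1
  · simp [h]
  · simp only [Bool.not_eq_true] at h
    simp [h, PySem.Dict.getD_insert_self, PySem.Dict.insert_insert_self,
      PySem.Dict.getD_of_not_contains _ _ h]

theorem pv_foldB_fst (ls : List (Int × String × Int)) (d e : PySem.Dict String Int) :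
    (ls.foldl pvStepB (d, e)).1
      = ls.foldl (fun d x => d.insert x.2.1 (d.getD x.2.1 0 + x.2.2)) d := by
  induction ls generalizing d e with
  | nil => rfl
  | cons x t ih =>
    simp only [List.foldl_cons]
    rw [show pvStepB (d, e) x = ((pvStepB (d, e) x).1, (pvStepB (d, e) x).2) from rfl]
    rw [ih, pvStepB_fst]

theorem pv_foldB_inv (ls : List (Int × String × Int)) (d e : PySem.Dict String Int)
    (hls : ls.Pairwise (fun a b => a.1 < b.1))
    (hk : d.keys = e.keys)
    (hup : ∀ x ∈ ls, ∀ k ∈ e.keys, e.getD k 0 < x.1)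
    (hpw : e.keys.Pairwise (fun a b => e.getD a 0 < e.getD b 0)) :
    (ls.foldl pvStepB (d, e)).1.keys = (ls.foldl pvStepB (d, e)).2.keys ∧
    (ls.foldl pvStepB (d, e)).2.keys.Pairwise
      (fun a b => (ls.foldl pvStepB (d, e)).2.getD a 0 < (ls.foldl pvStepB (d, e)).2.getD b 0) := by
  induction ls generalizing d e with
  | nil => exact ⟨hk, hpw⟩
  | cons x t ih =>
    rw [List.pairwise_cons] at hls
    simp only [List.foldl_cons]
    by_cases h : d.contains x.2.1
    · have hstep : pvStepB (d, e) x = (d.insert x.2.1 (d.getD x.2.1 0 + x.2.2), e) := by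
        unfold pvStepB; simp [h]
      rw [hstep]
      apply ih _ _ hls.2
      · rw [PySem.Dict.keys_insert_of_contains _ _ h, hk]
      · exact fun y hy k hk' => hup y (List.mem_cons_of_mem _ hy) k hk'
      · exact hpw
    · simp only [Bool.not_eq_true] at h
      have hstep : pvStepB (d, e) x
          = (d.insert x.2.1 (0 + x.2.2), e.insert x.2.1 x.1) := by
        unfold pvStepB
        simp [h, PySem.Dict.getD_insert_self, PySem.Dict.insert_insert_self]
      rw [hstep]
      have hkeys : (d.insert x.2.1 (0 + x.2.2)).keys = d.keys ++ [x.2.1] :=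
        PySem.Dict.keys_insert_of_not_contains _ _ h
      have hce : e.contains x.2.1 = false := by
        rw [PySem.Dict.contains_eq_decide_mem_keys] at h ⊢
        rw [← hk]; exact h
      have hkeyse : (e.insert x.2.1 x.1).keys = e.keys ++ [x.2.1] :=
        PySem.Dict.keys_insert_of_not_contains _ _ hce
      have hnotmem : x.2.1 ∉ e.keys := by
        rw [PySem.Dict.contains_eq_decide_mem_keys] at hce
        simpa using hce
      have hgd : ∀ k, (e.insert x.2.1 x.1).getD k 0 = if k = x.2.1 then x.1 else e.getD k 0 :=
        fun k => PySem.Dict.getD_insert _ _ _ _ _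
      apply ih _ _ hls.2
      · rw [hkeys, hkeyse, hk]
      · intro y hy k hkm
        rw [hkeyse, List.mem_append] at hkm
        rcases hkm with hkm | hkm
        · have hne : k ≠ x.2.1 := fun hkx => hnotmem (hkx ▸ hkm)
          rw [hgd k, if_neg hne]
          exact lt_trans (hup x (by simp) k hkm) (hls.1 y hy)
        · simp only [List.mem_singleton] at hkm
          rw [hgd k, if_pos hkm]
          exact hls.1 y hy
      · rw [hkeyse]
        rw [List.pairwise_append]
        refine ⟨?_, by simp, ?_⟩
        · apply hpw.imp_of_mem
          intro a b ha hb hab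
          have hna : a ≠ x.2.1 := fun hh => hnotmem (hh ▸ ha)
          have hnb : b ≠ x.2.1 := fun hh => hnotmem (hh ▸ hb)
          rw [hgd a, hgd b, if_neg hna, if_neg hnb]
          exact hab
        · intro a ha b hb
          simp only [List.mem_singleton] at hb
          subst hb
          have hna : a ≠ x.2.1 := fun hh => hnotmem (hh ▸ ha)
          rw [hgd a, hgd x.2.1, if_neg hna, if_pos rfl]
          exact hup x (by simp) a ha


theorem pv_insertBy_congr {α : Type} (p q : α → α → Bool) (x : α) (ys : List α)
    (h : ∀ y ∈ ys, p x y = q x y) :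
    PySem.List.insertBy p x ys = PySem.List.insertBy q x ys := by
  induction ys with
  | nil => rfl
  | cons y t ih =>
    show (if p x y = true then _ else _) = (if q x y = true then _ else _)
    rw [h y (by simp)]
    split
    · rfl
    · simp only [List.cons.injEq, true_and]
      exact ih (fun z hz => h z (by simp [hz]))

theorem pv_foldl_insertBy_congr {α : Type} (c1 c2 : α → α → Bool) :
    ∀ (xs acc : List α),
      (∀ y ∈ acc, ∀ x ∈ xs, c1 x y = c2 x y) →
      xs.Pairwise (fun a b => c1 b a = c2 b a) →
      xs.foldl (fun acc x => PySem.List.insertBy c1 x acc) acc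
        = xs.foldl (fun acc x => PySem.List.insertBy c2 x acc) acc := by
  intro xs
  induction xs with
  | nil => intro acc _ _; rfl
  | cons x t ih =>
    intro acc hacc hpw
    rw [List.pairwise_cons] at hpw
    simp only [List.foldl_cons]
    have h1 : PySem.List.insertBy c1 x acc = PySem.List.insertBy c2 x acc :=
      pv_insertBy_congr _ _ _ _ (fun y hy => hacc y hy x (by simp))
    rw [h1]
    apply ih
    · intro y hy z hz
      rw [PySem.List.mem_insertBy] at hy
      rcases hy with rfl | hy
      · exact hpw.1 z hz
      · exact hacc y hy z (by simp [hz])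
    · exact hpw.2

theorem pv_sorted_congr {α κ : Type} [LT κ] [DecidableLT κ] (xs : List α) (k1 k2 : α → κ)
    (rev : Bool) (h : ∀ x ∈ xs, k1 x = k2 x) :
    PySem.List.sorted xs k1 rev = PySem.List.sorted xs k2 rev := by
  have hpw : ∀ (R : α → α → Prop), (∀ a ∈ xs, ∀ b ∈ xs, R a b) → xs.Pairwise R := by
    intro R hR
    exact List.pairwise_iff_getElem.mpr
      (fun i j hi hj hij => hR _ (List.getElem_mem hi) _ (List.getElem_mem hj))
  cases rev with
  | false =>
    rw [PySem.List.sorted_eq_foldl_insertBy, PySem.List.sorted_eq_foldl_insertBy]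
    apply pv_foldl_insertBy_congr
    · intro y hy; simp at hy
    · exact hpw _ (fun a ha b hb => by rw [h a ha, h b hb])
  | true =>
    rw [PySem.List.sorted_rev_eq_foldl_insertBy, PySem.List.sorted_rev_eq_foldl_insertBy]
    apply pv_foldl_insertBy_congr
    · intro y hy; simp at hy
    · exact hpw _ (fun a ha b hb => by rw [h a ha, h b hb])

theorem pv_rev_eq_lexsort {α : Type} (xs : List α) (c f : α → Int)
    (h : xs.Pairwise fun a b => f a < f b) :
    PySem.List.sorted xs c true
      = PySem.List.sorted xs (fun a => toLex (-(c a), f a)) false := by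
  rw [PySem.List.sorted_rev_eq_foldl_insertBy, PySem.List.sorted_eq_foldl_insertBy]
  apply pv_foldl_insertBy_congr
  · intro y hy; simp at hy
  · apply h.imp
    intro a b hab
    -- a earlier, b later, f a < f b; show rev comparator on (b, a) = lex comparator on (b, a)
    have : (c a < c b) ↔ (toLex (-(c b), f b) < toLex (-(c a), f a)) := by
      rw [Prod.Lex.toLex_lt_toLex]
      constructor
      · intro hlt; left; omega
      · rintro (hlt | ⟨heq, hlt⟩)
        · omega
        · omega
    simp [this]


theorem pv_perm_flatMap_filter (gs : List String) (ls : List (Int × String × Int))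
    (hnd : gs.Nodup) (hcov : ∀ x ∈ ls, x.2.1 ∈ gs) :
    (gs.flatMap (fun g => ls.filter (fun x => x.2.1 == g))).Perm ls := by
  induction gs generalizing ls with
  | nil =>
    have : ls = [] := List.eq_nil_iff_forall_not_mem.mpr (fun x hx => by simpa using hcov x hx)
    simp [this]
  | cons g t ih =>
    rw [List.nodup_cons] at hnd
    rw [List.flatMap_cons]
    have hsplit : (ls.filter (fun x => x.2.1 == g) ++ ls.filter (fun x => !(x.2.1 == g))).Perm ls :=
      List.filter_append_perm _ ls
    have hrest : ∀ g' ∈ t, ls.filter (fun x => x.2.1 == g')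
        = (ls.filter (fun x => !(x.2.1 == g))).filter (fun x => x.2.1 == g') := by
      intro g' hg'
      rw [List.filter_filter]
      apply List.filter_congr
      intro x hx
      by_cases hxg : x.2.1 = g'
      · have hgg : g' ≠ g := fun hh => hnd.1 (hh ▸ hg')
        simp [hxg, hgg]
      · simp [hxg]
    have hmap : t.flatMap (fun g' => ls.filter (fun x => x.2.1 == g'))
        = t.flatMap (fun g' => (ls.filter (fun x => !(x.2.1 == g))).filter (fun x => x.2.1 == g')) :=
      List.flatMap_congr hrest
    rw [hmap]
    refine List.Perm.trans (List.Perm.append_left _ (ih _ hnd.2 ?_)) hsplit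
    intro x hx
    rw [List.mem_filter] at hx
    have := hcov x hx.1
    rw [List.mem_cons] at this
    rcases this with hh | hh
    · simp [hh] at hx
    · exact hh

theorem pv_flatMap_perm {α β : Type} (gs : List α) (h1 h2 : α → List β)
    (h : ∀ g ∈ gs, (h1 g).Perm (h2 g)) : (gs.flatMap h1).Perm (gs.flatMap h2) := by
  induction gs with
  | nil => rfl
  | cons g t ih =>
    rw [List.flatMap_cons, List.flatMap_cons]
    exact (h g (by simp)).append (ih (fun g' hg' => h g' (by simp [hg'])))

theorem pv_pairwise_flatMap {α β : Type} (R : β → β → Prop) (gs : List α) (bf : α → List β)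
    (hcross : gs.Pairwise (fun a b => ∀ x ∈ bf a, ∀ y ∈ bf b, R x y))
    (hin : ∀ g ∈ gs, (bf g).Pairwise R) :
    (gs.flatMap bf).Pairwise R := by
  induction gs with
  | nil => simp
  | cons g t ih =>
    rw [List.pairwise_cons] at hcross
    rw [List.flatMap_cons, List.pairwise_append]
    refine ⟨hin g (by simp), ih hcross.2 (fun g' hg' => hin g' (by simp [hg'])), ?_⟩
    intro a ha b hb
    rw [List.mem_flatMap] at hb
    obtain ⟨g', hg', hbg'⟩ := hb
    exact hcross.1 g' hg' a ha b hbg'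
theorem pv_pass_block (bs : List (Int × String × Int)) (g : String)
    (hg : ∀ x ∈ bs, x.2.1 = g) (acc : List Int) (tk : PySem.Dict String Int) (c : Nat)
    (hc : tk.getD g 0 = (c : Int)) (hc2 : c ≤ 2) :
    (bs.foldl pvStepP (acc, tk)).1 = acc ++ (bs.take (2 - c)).map (fun x => x.1) ∧
    ∀ k, (bs.foldl pvStepP (acc, tk)).2.getD k 0
      = if k = g then ((min (c + bs.length) 2 : Nat) : Int) else tk.getD k 0 := by
  induction bs generalizing acc tk c with
  | nil =>
    refine ⟨by simp, fun k => ?_⟩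
    by_cases hk : k = g
    · subst hk; rw [if_pos rfl]; simp; omega
    · rw [if_neg hk]; simp
  | cons x t ih =>
    have hxg : x.2.1 = g := hg x (by simp)
    simp only [List.foldl_cons]
    by_cases hlt : c < 2
    · have hstep : pvStepP (acc, tk) x = (acc ++ [x.1], tk.insert g ((c : Int) + 1)) := by
        unfold pvStepP
        simp only [hxg, hc]
        rw [if_pos (by exact_mod_cast hlt)]
      rw [hstep]
      obtain ⟨h1, h2⟩ := ih (fun y hy => hg y (by simp [hy])) (acc ++ [x.1]) (tk.insert g ((c:Int)+1)) (c+1)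
        (by rw [PySem.Dict.getD_insert, if_pos rfl]; push_cast; ring) (by omega)
      constructor
      · rw [h1]
        have : 2 - c = (2 - (c+1)) + 1 := by omega
        rw [this, List.take_succ_cons, List.map_cons, List.append_assoc]
        rfl
      · intro k
        rw [h2 k]
        by_cases hk : k = g
        · subst hk
          rw [if_pos rfl, if_pos rfl]
          congr 1
          simp only [List.length_cons]
          omega
        · rw [if_neg hk, if_neg hk, PySem.Dict.getD_insert, if_neg hk]
    · have hc2' : c = 2 := by omega
      have hstep : pvStepP (acc, tk) x = (acc, tk) := by
        unfold pvStepP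
        simp only [hxg, hc]
        rw [if_neg (by exact_mod_cast hlt)]
      rw [hstep]
      obtain ⟨h1, h2⟩ := ih (fun y hy => hg y (by simp [hy])) acc tk c hc hc2
      constructor
      · rw [h1]; subst hc2'; simp
      · intro k
        rw [h2 k]
        by_cases hk : k = g
        · subst hk
          rw [if_pos rfl, if_pos rfl]
          congr 1
          subst hc2'
          simp only [List.length_cons]
          omega
        · rw [if_neg hk, if_neg hk]

theorem pv_pass_flatMap (gs : List String) (hnd : gs.Nodup)
    (bf : String → List (Int × String × Int)) (hg : ∀ g ∈ gs, ∀ x ∈ bf g, x.2.1 = g)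
    (acc : List Int) (tk : PySem.Dict String Int) (h0 : ∀ g ∈ gs, tk.getD g 0 = 0) :
    ((gs.flatMap bf).foldl pvStepP (acc, tk)).1
      = acc ++ gs.flatMap (fun g => ((bf g).take 2).map (fun x => x.1)) := by
  induction gs generalizing acc tk with
  | nil => simp
  | cons g t ih =>
    rw [List.nodup_cons] at hnd
    rw [List.flatMap_cons, List.foldl_append]
    obtain ⟨h1, h2⟩ := pv_pass_block (bf g) g (hg g (by simp)) acc tk 0
      (by exact_mod_cast h0 g (by simp)) (by omega)
    have hpair : (bf g).foldl pvStepP (acc, tk)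
        = (((bf g).foldl pvStepP (acc, tk)).1, ((bf g).foldl pvStepP (acc, tk)).2) := rfl
    rw [hpair, h1]
    rw [ih hnd.2 (fun g' hg' => hg g' (by simp [hg'])) _ _
      (fun g' hg' => by
        have hne : g' ≠ g := fun hh => hnd.1 (hh ▸ hg')
        rw [h2 g', if_neg hne]
        exact h0 g' (by simp [hg']))]
    rw [List.flatMap_cons, List.append_assoc]



def pvKeyG (total first : PySem.Dict String Int) (g : String) : Lex (Int × Int) :=
  toLex (-(total.getD g 0), first.getD g 0)

-- bridge: port A written as a flatMap over its sorted genre list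
theorem pv_bridgeA (genres : List String) (plays : List Int) :
    solution genres plays
      = (PySem.List.sorted (pvCnt genres plays).keys (fun x => (pvCnt genres plays).getD x 0) true).flatMap
          (fun g => ((PySem.List.sorted ((pvSong genres plays).getD g []) (fun q => toLex q)).take 2).map
            (fun q => q.2)) := by
  have hsplit : (PySem.List.enumerate (genres.zip plays)).foldl
      (fun st x =>
        (st.1.modify x.2.1 0 (· + x.2.2),
         st.2.modify x.2.1 [] (· ++ [(-x.2.2, x.1)])))
      ((PySem.Dict.empty : PySem.Dict String Int),
       (PySem.Dict.empty : PySem.Dict String (List (Int × Int))))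
      = (pvCnt genres plays, pvSong genres plays) :=
    PySem.List.foldl_prod_mk
      (fun (d : PySem.Dict String Int) (x : Int × String × Int) => d.modify x.2.1 0 (· + x.2.2))
      (fun (d : PySem.Dict String (List (Int × Int))) (x : Int × String × Int) =>
        d.modify x.2.1 [] (· ++ [(-x.2.2, x.1)])) _ _ _
  simp only [solution, hsplit]
  rw [PySem.List.foldl_append_eq_flatMap]
  simp

-- bridge: port B written with the proof-side names
theorem pv_bridgeB (genres : List String) (plays : List Int) :
    solution_alt genres plays
      = ((PySem.List.sorted (pvL genres plays)
            (pvKeyB (pvTF genres plays).1 (pvTF genres plays).2) false).foldl pvStepP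
          (([] : List Int), PySem.Dict.empty)).1 := rfl

theorem pv_keysA (genres : List String) (plays : List Int) :
    (pvCnt genres plays).keys = PySem.Set.update [] ((pvL genres plays).map (fun x => x.2.1)) := by
  unfold pvCnt
  rw [PySem.Dict.keys_foldl_modify_key, PySem.Dict.keys_empty]

theorem pv_nodupA (genres : List String) (plays : List Int) : (pvCnt genres plays).keys.Nodup := by
  unfold pvCnt
  exact PySem.Dict.nodup_keys_foldl_modify_key _ _ _ _ _ PySem.Dict.nodup_keys_empty

theorem pv_keys_tot (genres : List String) (plays : List Int) :
    (pvTF genres plays).1.keys = (pvCnt genres plays).keys := by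
  unfold pvTF
  rw [pv_foldB_fst, PySem.Dict.keys_foldl_insert_key, PySem.Dict.keys_empty, pv_keysA]

theorem pv_getD_tot (genres : List String) (plays : List Int) (g : String) :
    (pvTF genres plays).1.getD g 0 = (pvCnt genres plays).getD g 0 := by
  unfold pvTF pvCnt
  rw [pv_foldB_fst, pv_tot_getD, pv_cnt_getD]

theorem pv_L_pairwise (genres : List String) (plays : List Int) :
    (pvL genres plays).Pairwise (fun a b => a.1 < b.1) := pv_enum_pairwise _ _

theorem pv_inv (genres : List String) (plays : List Int) :
    (pvTF genres plays).1.keys = (pvTF genres plays).2.keys ∧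
    (pvTF genres plays).2.keys.Pairwise
      (fun a b => (pvTF genres plays).2.getD a 0 < (pvTF genres plays).2.getD b 0) := by
  unfold pvTF
  exact pv_foldB_inv _ _ _ (pv_L_pairwise genres plays)
    (by simp [PySem.Dict.keys_empty])
    (by intro x _ k hk; rw [PySem.Dict.keys_empty] at hk; simp at hk)
    (by rw [PySem.Dict.keys_empty]; exact List.Pairwise.nil)

theorem pv_fst_pw (genres : List String) (plays : List Int) :
    (pvCnt genres plays).keys.Pairwise
      (fun a b => (pvTF genres plays).2.getD a 0 < (pvTF genres plays).2.getD b 0) := by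
  rw [← pv_keys_tot, (pv_inv genres plays).1]
  exact (pv_inv genres plays).2

-- A's stable reverse genre sort is the forward sort by the (-total, first-appearance) key
theorem pv_gs_eq (genres : List String) (plays : List Int) :
    PySem.List.sorted (pvCnt genres plays).keys (fun x => (pvCnt genres plays).getD x 0) true
      = PySem.List.sorted (pvCnt genres plays).keys
          (pvKeyG (pvTF genres plays).1 (pvTF genres plays).2) false := by
  rw [pv_rev_eq_lexsort (pvCnt genres plays).keys _ (fun g => (pvTF genres plays).2.getD g 0)
    (pv_fst_pw genres plays)]
  apply pv_sorted_congr
  intro g _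
  unfold pvKeyG
  rw [pv_getD_tot]

theorem pv_fst_ne (genres : List String) (plays : List Int) :
    ∀ a ∈ (pvCnt genres plays).keys, ∀ b ∈ (pvCnt genres plays).keys, a ≠ b →
      (pvTF genres plays).2.getD a 0 ≠ (pvTF genres plays).2.getD b 0 := by
  have h := (pv_fst_pw genres plays).imp (fun hlt => ne_of_lt hlt)
  intro a ha b hb hab
  exact List.Pairwise.forall (fun _ _ hh => hh.symm) h ha hb hab

theorem pv_gs'_strict (genres : List String) (plays : List Int) :
    (PySem.List.sorted (pvCnt genres plays).keys
        (pvKeyG (pvTF genres plays).1 (pvTF genres plays).2) false).Pairwise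
      (fun a b => pvKeyG (pvTF genres plays).1 (pvTF genres plays).2 a
        < pvKeyG (pvTF genres plays).1 (pvTF genres plays).2 b) := by
  have hnd : (PySem.List.sorted (pvCnt genres plays).keys
      (pvKeyG (pvTF genres plays).1 (pvTF genres plays).2) false).Nodup :=
    ((PySem.List.sorted_perm _ _ _).nodup_iff).mpr (pv_nodupA genres plays)
  have hle := PySem.List.sorted_pairwise (pvCnt genres plays).keys
    (pvKeyG (pvTF genres plays).1 (pvTF genres plays).2)
  refine (hle.and hnd).imp_of_mem ?_
  intro a b ha hb hab
  refine lt_of_le_of_ne hab.1 ?_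
  intro hkey
  apply hab.2
  have ha' : a ∈ (pvCnt genres plays).keys := (PySem.List.mem_sorted _ _ _ _).mp ha
  have hb' : b ∈ (pvCnt genres plays).keys := (PySem.List.mem_sorted _ _ _ _).mp hb
  by_contra hne
  apply pv_fst_ne genres plays a ha' b hb' hne
  unfold pvKeyG at hkey
  simp only [toLex_inj, Prod.mk.injEq] at hkey
  exact hkey.2

theorem pv_block_genre (genres : List String) (plays : List Int) (g : String) :
    ∀ x ∈ pvBlock genres plays g, x.2.1 = g := by
  intro x hx
  unfold pvBlock at hx
  rw [List.mem_filter] at hx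
  exact beq_iff_eq.mp hx.2

theorem pv_SB_genre (genres : List String) (plays : List Int) (g : String) :
    ∀ x ∈ pvSB genres plays g, x.2.1 = g := by
  intro x hx
  unfold pvSB at hx
  exact pv_block_genre genres plays g x ((PySem.List.mem_sorted _ _ _ _).mp hx)

theorem pv_SB_strict (genres : List String) (plays : List Int) (g : String) :
    (pvSB genres plays g).Pairwise
      (fun x y => pvKeyB (pvTF genres plays).1 (pvTF genres plays).2 x
        < pvKeyB (pvTF genres plays).1 (pvTF genres plays).2 y) := by
  have hids : (pvBlock genres plays g).Pairwise (fun a b => a.1 ≠ b.1) :=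
    ((pv_L_pairwise genres plays).filter _).imp (fun hlt => ne_of_lt hlt)
  have hids' : (pvSB genres plays g).Pairwise (fun a b => a.1 ≠ b.1) :=
    ((PySem.List.sorted_perm _ _ _).pairwise_iff (fun hh => hh.symm)).mpr hids
  have hle := PySem.List.sorted_pairwise (pvBlock genres plays g)
    (pvKeyB (pvTF genres plays).1 (pvTF genres plays).2)
  refine ((hle.and hids').imp ?_ : _)
  intro a b hab
  refine lt_of_le_of_ne hab.1 ?_
  intro hkey
  apply hab.2
  unfold pvKeyB at hkey
  simp only [toLex_inj, Prod.mk.injEq] at hkey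
  exact hkey.2.2.2

theorem pv_S_eq (genres : List String) (plays : List Int) :
    PySem.List.sorted (pvL genres plays)
        (pvKeyB (pvTF genres plays).1 (pvTF genres plays).2) false
      = (PySem.List.sorted (pvCnt genres plays).keys
          (pvKeyG (pvTF genres plays).1 (pvTF genres plays).2) false).flatMap
            (pvSB genres plays) := by
  have hnd : (PySem.List.sorted (pvCnt genres plays).keys
      (pvKeyG (pvTF genres plays).1 (pvTF genres plays).2) false).Nodup :=
    ((PySem.List.sorted_perm _ _ _).nodup_iff).mpr (pv_nodupA genres plays)
  have hcov : ∀ x ∈ pvL genres plays, x.2.1 ∈ PySem.List.sorted (pvCnt genres plays).keys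
      (pvKeyG (pvTF genres plays).1 (pvTF genres plays).2) false := by
    intro x hx
    rw [PySem.List.mem_sorted]
    rw [pv_keysA, PySem.Set.mem_update]
    right
    exact List.mem_map.mpr ⟨x, hx, rfl⟩
  apply PySem.List.sorted_eq_of_perm_of_pairwise_lt
  · refine List.Perm.trans ?_ (pv_perm_flatMap_filter _ (pvL genres plays) hnd hcov)
    apply pv_flatMap_perm
    intro g' _
    exact PySem.List.sorted_perm _ _ _
  · apply pv_pairwise_flatMap
    · refine (pv_gs'_strict genres plays).imp_of_mem ?_
      intro a b _ _ hab x hxa y hyb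
      have hga := pv_SB_genre genres plays a x hxa
      have hgb := pv_SB_genre genres plays b y hyb
      unfold pvKeyG at hab
      unfold pvKeyB
      rw [hga, hgb]
      simp only [Prod.Lex.toLex_lt_toLex] at hab ⊢
      tauto
    · intro g' _
      exact pv_SB_strict genres plays g'

theorem pv_M_eq (genres : List String) (plays : List Int) (g : String) :
    PySem.List.sorted ((pvSong genres plays).getD g []) (fun q => toLex q)
      = (pvSB genres plays g).map (fun x => (-x.2.2, x.1)) := by
  have hsong : (pvSong genres plays).getD g []
      = (pvBlock genres plays g).map (fun x => (-x.2.2, x.1)) := by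
    unfold pvSong pvBlock
    rw [pv_song_getD]
    simp
  apply PySem.List.sorted_eq_of_perm_of_pairwise_lt
  · rw [hsong]
    exact List.Perm.map _ (PySem.List.sorted_perm _ _ _)
  · rw [List.pairwise_map]
    refine (pv_SB_strict genres plays g).imp_of_mem ?_
    intro a b ha hb hab
    have hga := pv_SB_genre genres plays g a ha
    have hgb := pv_SB_genre genres plays g b hb
    unfold pvKeyB at hab
    rw [hga, hgb] at hab
    simp only [Prod.Lex.toLex_lt_toLex] at hab ⊢
    omega


-- ===== VERDICT (by name: the statement is the Claim_ definition above) =====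
theorem solution_spec : Claim_equal_solution := by
  intro genres plays _
  show solution genres plays = solution_alt genres plays
  rw [pv_bridgeA, pv_bridgeB, pv_gs_eq, pv_S_eq]
  rw [pv_pass_flatMap _ (((PySem.List.sorted_perm _ _ _).nodup_iff).mpr (pv_nodupA genres plays))
    (pvSB genres plays) (fun g' _ => pv_SB_genre genres plays g') [] PySem.Dict.empty
    (fun g' _ => PySem.Dict.getD_empty _ _)]
  rw [List.nil_append]
  apply List.flatMap_congr
  intro g _
  rw [pv_M_eq, ← List.map_take, List.map_map]
  rfl
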